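-- pv_equiv track=rewrite | github.com/WillemKauf/AdventOfCode | 2017/11.py | part_2
-- ===== SOURCE A (Python) =====
-- def part_2(input_lst):
--     max_dist = -1
--     dir_map  = {"n":(-1,0,1), "s":(1,0,-1), "se":(0,1,-1), "sw":(1,-1,0), "ne":(-1,1,0), "nw":(0,-1,1)}
--     r,q,s    = 0,0,0
--     for d in input_lst:
--         dr,dq,ds = dir_map[d]
--         r += dr
--         q += dq
--         s += ds
--         curr_dist = (abs(r)+abs(q)+abs(s))//2
--         max_dist  = max(max_dist, curr_dist)
--     return max_dist
-- ===== SOURCE B (Python) =====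
-- def part_2(input_lst):
--     # Per-coordinate decomposition in axial coordinates (the redundant third cube
--     # coordinate is dropped): one pass of prefix sums for r, an independent pass
--     # for q, then a zip that maps each position to max(|r|,|q|,|r+q|) (the
--     # division-free hex distance) and reduces with max (default -1).
--     dr = {"n": -1, "s": 1, "se": 0, "sw": 1, "ne": -1, "nw": 0}
--     dq = {"n": 0, "s": 0, "se": 1, "sw": -1, "ne": 1, "nw": -1}
--     rs = []
--     t = 0
--     for d in input_lst:
--         t += dr[d]
--         rs.append(t)
--     qs = []
--     t = 0
--     for d in input_lst:
--         t += dq[d]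
--         qs.append(t)
--     return max((max(abs(r), abs(q), abs(r + q)) for r, q in zip(rs, qs)),
--                default=-1)
-- ===== Notes on version B (the rewrite author's own statement) =====
-- stated objective: alternative
-- what changed: A walks once with three cube coordinates plus a running max, computing each distance as (|r|+|q|+|s|)//2; B drops the redundant third coordinate and splits the problem per coordinate: two independent prefix-sum passes (one for r, one for q), then a zip/map to the division-free distance max(|r|,|q|,|r+q|) and a max reduction with default -1.
import Mathlib
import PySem

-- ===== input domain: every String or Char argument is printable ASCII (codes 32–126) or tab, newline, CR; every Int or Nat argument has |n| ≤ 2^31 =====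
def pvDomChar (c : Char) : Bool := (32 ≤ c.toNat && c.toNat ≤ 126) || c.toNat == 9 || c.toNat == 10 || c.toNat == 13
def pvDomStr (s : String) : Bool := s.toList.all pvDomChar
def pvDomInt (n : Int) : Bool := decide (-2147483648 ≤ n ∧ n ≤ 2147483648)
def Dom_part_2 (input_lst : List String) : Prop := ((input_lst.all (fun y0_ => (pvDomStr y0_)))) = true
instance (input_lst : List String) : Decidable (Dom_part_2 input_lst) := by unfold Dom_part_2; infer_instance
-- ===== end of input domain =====

-- B replaces A's fused cube-coordinate walk with a running max by two independent axial
-- prefix-sum passes, a zip to the division-free distance max(|r|,|q|,|r+q|) and a max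
-- reduction (objective: alternative decomposition, same cost).

-- ===== PORT A =====
-- the dict literal dir_map of A
def dirMap : PySem.Dict String (Int × Int × Int) :=
  PySem.Dict.ofList [("n", (-1, 0, 1)), ("s", (1, 0, -1)), ("se", (0, 1, -1)),
                     ("sw", (1, -1, 0)), ("ne", (-1, 1, 0)), ("nw", (0, -1, 1))]

-- A's loop over input_lst carrying (r, q, s, max_dist); none = KeyError (excluded by Pre_)
def part2LoopA : List String → Int → Int → Int → Int → Option Int
  | [], _, _, _, max_dist => some max_dist
  | d :: rest, r, q, s, max_dist =>
    match dirMap.get? d with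
    | none => none
    | some (dr, dq, ds) =>
      let r' := r + dr
      let q' := q + dq
      let s' := s + ds
      let curr_dist := PySem.Int.floordiv (|r'| + |q'| + |s'|) 2
      part2LoopA rest r' q' s' (max max_dist curr_dist)

def part_2 (input_lst : List String) : Int :=
  (part2LoopA input_lst 0 0 0 (-1)).getD (-1)   -- getD unreachable: none only on KeyError, outside Pre_

-- ===== PORT B =====
-- B's two per-coordinate dict literals
def drMapB : PySem.Dict String Int :=
  PySem.Dict.ofList [("n", -1), ("s", 1), ("se", 0), ("sw", 1), ("ne", -1), ("nw", 0)]
def dqMapB : PySem.Dict String Int :=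
  PySem.Dict.ofList [("n", 0), ("s", 0), ("se", 1), ("sw", -1), ("ne", 1), ("nw", -1)]

-- one prefix-sum pass over input_lst with a delta dict; none = KeyError (excluded by Pre_)
def prefixSumsB (delta : PySem.Dict String Int) : List String → Int → Option (List Int)
  | [], _ => some []
  | d :: rest, t =>
    match delta.get? d with
    | none => none
    | some x => (prefixSumsB delta rest (t + x)).map ((t + x) :: ·)

def part_2_alt (input_lst : List String) : Int :=
  match prefixSumsB drMapB input_lst 0, prefixSumsB dqMapB input_lst 0 with
  | some rs, some qs =>
    ((rs.zip qs).map (fun p => max |p.1| (max |p.2| |p.1 + p.2|))).foldl max (-1)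
  | _, _ => -1   -- unreachable under Pre_ (B raises KeyError there)

-- ===== PRECONDITION & SPEC =====
-- Pre_ excludes exactly the inputs containing a direction not in dir_map, on which both A and B raise KeyError.
def Pre_part_2 (input_lst : List String) : Prop :=
  ∀ d ∈ input_lst, d ∈ ["n", "s", "se", "sw", "ne", "nw"]
instance (input_lst : List String) : Decidable (Pre_part_2 input_lst) := by unfold Pre_part_2; infer_instance

def pvWitness_part_2 : List String := ["ne", "ne", "sw", "se", "nw", "n", "s"]

def Spec_part_2 (input_lst : List String) (out : Int) : Prop := out = part_2_alt input_lst
instance (input_lst : List String) (out : Int) : Decidable (Spec_part_2 input_lst out) := by unfold Spec_part_2; infer_instance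

-- ===== CLAIM (what is proved, stated in full; the proofs are below) =====
def Claim_equal_part_2 : Prop := ∀ (input_lst : List String), Dom_part_2 input_lst → Pre_part_2 input_lst → Spec_part_2 input_lst (part_2 input_lst)

-- ===== LEMMAS AND PROOFS =====

-- the three lookups of a valid direction are consistent: A's cube triple is B's
-- two axial deltas with third coordinate -(dr+dq)
theorem dir_consistent (d : String) (hd : d ∈ ["n", "s", "se", "sw", "ne", "nw"]) :
    ∃ dr dq : Int, drMapB.get? d = some dr ∧ dqMapB.get? d = some dq ∧
      dirMap.get? d = some (dr, dq, -(dr + dq)) := by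
  fin_cases hd <;> exact ⟨_, _, rfl, rfl, rfl⟩

-- on a cube position (a, b, -(a+b)), A's distance (|a|+|b|+|a+b|)//2 equals B's max(|a|,|b|,|a+b|)
theorem dist_eq (a b : Int) :
    PySem.Int.floordiv (|a| + |b| + |a + b|) 2 = max |a| (max |b| |a + b|) := by
  rw [PySem.Int.floordiv_eq_ediv_of_pos (by norm_num)]
  rcases abs_cases a with ⟨h1, _⟩ | ⟨h1, _⟩ <;>
    rcases abs_cases b with ⟨h2, _⟩ | ⟨h2, _⟩ <;>
    rcases abs_cases (a + b) with ⟨h3, _⟩ | ⟨h3, _⟩ <;>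
    rw [h1, h2, h3] <;> omega

-- under Pre_, both of B's prefix-sum passes succeed and A's fused loop equals
-- B's zip-map-fold over them
theorem part2_loop_eq (l : List String) :
    ∀ (r q s m : Int), s = -(r + q) → Pre_part_2 l →
    ∃ rs qs, prefixSumsB drMapB l r = some rs ∧ prefixSumsB dqMapB l q = some qs ∧
      part2LoopA l r q s m =
        some (((rs.zip qs).map (fun p => max |p.1| (max |p.2| |p.1 + p.2|))).foldl max m) := by
  induction l with
  | nil => intro r q s m _ _; exact ⟨[], [], rfl, rfl, rfl⟩
  | cons d rest ih =>
    intro r q s m hs hpre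
    obtain ⟨dr, dq, hdr, hdq, hcube⟩ := dir_consistent d (hpre d (List.mem_cons_self ..))
    obtain ⟨rs, qs, hrs, hqs, ha⟩ := ih (r + dr) (q + dq) (s + -(dr + dq))
      (max m (PySem.Int.floordiv (|r + dr| + |q + dq| + |s + -(dr + dq)|) 2))
      (by omega) (fun x hx => hpre x (List.mem_cons_of_mem _ hx))
    refine ⟨(r + dr) :: rs, (q + dq) :: qs, ?_, ?_, ?_⟩
    · simp [prefixSumsB, hdr, hrs]
    · simp [prefixSumsB, hdq, hqs]
    · have habs : s + -(dr + dq) = -((r + dr) + (q + dq)) := by omega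
      rw [habs, abs_neg, dist_eq] at ha
      simp only [part2LoopA, hcube, habs, abs_neg, dist_eq, List.zip_cons_cons, List.map_cons,
        List.foldl_cons]
      exact ha

-- ===== VERDICT (by name: the statement is the Claim_ definition above) =====
theorem part_2_spec : Claim_equal_part_2 := by
  intro l _ hpre
  obtain ⟨rs, qs, hrs, hqs, ha⟩ := part2_loop_eq l 0 0 0 (-1) (by omega) hpre
  simp [Spec_part_2, part_2, part_2_alt, hrs, hqs, ha]
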